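-- pv_equiv track=rewrite | github.com/tiredkangaroo/codewar | opposite_count.py | opposite_count
-- ===== SOURCE A (Python) =====
-- def opposite_count(nums):
--     finalint = 0
--     i = 1
--     for s in nums:
--         while i < len(nums) - 1:
--             if s + nums[i] == 0 and nums.index(s) < i:
--                 finalint += 1
--             i += 1
--         i = 1
--     return finalint
-- ===== SOURCE B (Python) =====
-- def opposite_count(nums):
--     cnt = {}
--     first = {}
--     for j, v in enumerate(nums):
--         cnt[v] = cnt.get(v, 0) + 1
--         if v not in first:
--             first[v] = j
--     total = 0
--     for i in range(1, len(nums) - 1):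
--         t = -nums[i]
--         if t in first and first[t] < i:
--             total += cnt[t]
--     return total
-- ===== Notes on version B (the rewrite author's own statement) =====
-- stated objective: faster
-- what changed: Replaces A's triple scan (for every element, rescan the index range and call nums.index inside the loop) with a single pass building count and first-index dictionaries followed by one linear pass over the index range.
import Mathlib
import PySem

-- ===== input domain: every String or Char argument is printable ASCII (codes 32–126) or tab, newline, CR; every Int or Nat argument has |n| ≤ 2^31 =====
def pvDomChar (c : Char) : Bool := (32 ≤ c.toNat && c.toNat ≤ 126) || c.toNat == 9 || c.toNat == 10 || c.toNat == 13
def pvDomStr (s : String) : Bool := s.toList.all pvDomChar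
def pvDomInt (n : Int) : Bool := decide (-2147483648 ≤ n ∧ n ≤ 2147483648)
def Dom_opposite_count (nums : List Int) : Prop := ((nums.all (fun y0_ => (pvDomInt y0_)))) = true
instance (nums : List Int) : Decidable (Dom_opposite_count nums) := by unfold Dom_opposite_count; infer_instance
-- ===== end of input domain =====

-- B replaces A's cubic scan (for each element, rescan a range and call nums.index) by one
-- counting pass building count/first-index dicts plus one linear pass; objective: faster (asymptotic).


-- ===== PORT A =====
def opposite_count (nums : List Int) : Int :=
  nums.foldl (fun finalint s =>
    (PySem.List.pyRange 1 ((nums.length : Int) - 1) 1).foldl (fun acc i =>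
      -- 'if s + nums[i] == 0 and nums.index(s) < i'; s is drawn from nums, so index() never raises
      if s + PySem.List.pyGetD nums i 0 = 0 then
        match PySem.List.index? nums s with
        | some k => if (k : Int) < i then acc + 1 else acc
        | none => acc
      else acc) finalint) 0

-- ===== PORT B =====
def opposite_count_alt (nums : List Int) : Int :=
  let st := (PySem.List.enumerate nums 0).foldl
      (fun (st : PySem.Dict Int Int × PySem.Dict Int Int) jv =>
        (st.1.insert jv.2 (st.1.getD jv.2 0 + 1),
         if st.2.contains jv.2 then st.2 else st.2.insert jv.2 jv.1))
      (PySem.Dict.empty, PySem.Dict.empty)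
  (PySem.List.pyRange 1 ((nums.length : Int) - 1) 1).foldl
    (fun total i =>
      let t := -(PySem.List.pyGetD nums i 0)
      if st.2.contains t ∧ st.2.getD t 0 < i then total + st.1.getD t 0 else total) 0

-- ===== PRECONDITION & SPEC =====
def Spec_opposite_count (nums : List Int) (out : Int) : Prop := out = opposite_count_alt nums
instance (nums : List Int) (out : Int) : Decidable (Spec_opposite_count nums out) := by unfold Spec_opposite_count; infer_instance

-- ===== CLAIM (what is proved, stated in full; the proofs are below) =====
def Claim_equal_opposite_count : Prop := ∀ (nums : List Int), Dom_opposite_count nums → Spec_opposite_count nums (opposite_count nums)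

-- ===== LEMMAS AND PROOFS =====

-- the per-pair indicator A sums
def aBody (nums : List Int) (s i : Int) : Int :=
  if s + PySem.List.pyGetD nums i 0 = 0 then
    match PySem.List.index? nums s with
    | some k => if (k : Int) < i then 1 else 0
    | none => 0
  else 0

-- the count dictionary B builds
def cntD (nums : List Int) : PySem.Dict Int Int :=
  nums.foldl (fun d x => d.insert x (d.getD x 0 + 1)) PySem.Dict.empty

-- the first-index dictionary B builds
def fstD (nums : List Int) : PySem.Dict Int Int :=
  (PySem.List.enumerate nums 0).foldl
    (fun d jv => if d.contains jv.2 then d else d.insert jv.2 jv.1) PySem.Dict.empty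

-- the per-index contribution B sums
def bBody (nums : List Int) (i : Int) : Int :=
  if (fstD nums).contains (-(PySem.List.pyGetD nums i 0)) ∧
     (fstD nums).getD (-(PySem.List.pyGetD nums i 0)) 0 < i
  then (cntD nums).getD (-(PySem.List.pyGetD nums i 0)) 0 else 0

lemma pairFold (l : List Int) (s : Int) (d1 d2 : PySem.Dict Int Int) :
    (PySem.List.enumerate l s).foldl
      (fun (st : PySem.Dict Int Int × PySem.Dict Int Int) jv =>
        (st.1.insert jv.2 (st.1.getD jv.2 0 + 1),
         if st.2.contains jv.2 then st.2 else st.2.insert jv.2 jv.1)) (d1, d2)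
    = (l.foldl (fun d x => d.insert x (d.getD x 0 + 1)) d1,
       (PySem.List.enumerate l s).foldl
         (fun d jv => if d.contains jv.2 then d else d.insert jv.2 jv.1) d2) := by
  induction l generalizing s d1 d2 with
  | nil => simp [PySem.List.enumerate]
  | cons x xs ih => simp [PySem.List.enumerate_cons, ih]

lemma firstGet (l : List Int) (s : Int) (d : PySem.Dict Int Int) (v : Int) :
    ((PySem.List.enumerate l s).foldl
      (fun d jv => if d.contains jv.2 then d else d.insert jv.2 jv.1) d).get? v
    = if d.contains v then d.get? v
      else (PySem.List.index? l v).map (fun k => s + (k : Int)) := by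
  induction l generalizing s d with
  | nil =>
    simp only [PySem.List.enumerate, List.foldl_nil]
    by_cases h : d.contains v
    · simp [h]
    · have := (PySem.Dict.get?_eq_none_iff_contains d v).2 (by simp [h])
      simp [h, this, PySem.List.index?]
  | cons x xs ih =>
    rw [PySem.List.enumerate_cons, List.foldl_cons]
    by_cases hx : d.contains x
    · simp only [hx, if_true, ih]
      by_cases hv : d.contains v
      · simp [hv]
      · have hxv : x ≠ v := fun h => by rw [h] at hx; rw [hx] at hv; exact hv rfl
        rw [PySem.List.index?_cons_of_ne _ hxv]
        rcases PySem.List.index? xs v with _ | k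
        · simp [hv]
        · simp [hv]; ring
    · have hx' : d.contains x = false := by simpa using hx
      simp only [hx', Bool.false_eq_true, if_false, ih]
      by_cases hvx : v = x
      · subst hvx
        have hdv : d.contains v = false := by simpa using hx
        rw [PySem.List.index?_cons_self, PySem.Dict.contains_insert,
          PySem.Dict.get?_insert]
        simp [hdv]
      · rw [PySem.Dict.contains_insert, PySem.Dict.get?_insert]
        have hb : (v == x) = false := by simpa using hvx
        simp only [hb, Bool.false_or, if_neg hvx]
        by_cases hv : d.contains v
        · simp [hv]
        · have hxv : x ≠ v := fun h => hvx h.symm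
          rw [PySem.List.index?_cons_of_ne _ hxv]
          rcases PySem.List.index? xs v with _ | k
          · simp [hv]
          · simp [hv]; ring

lemma fstD_get (nums : List Int) (v : Int) :
    (fstD nums).get? v = (PySem.List.index? nums v).map (fun k => (k : Int)) := by
  unfold fstD
  rw [firstGet]
  have : (PySem.Dict.empty : PySem.Dict Int Int).contains v = false := by
    exact (PySem.Dict.get?_eq_none_iff_contains _ v).1 rfl
  simp [this]

lemma fstD_contains (nums : List Int) (v : Int) :
    (fstD nums).contains v = true ↔ v ∈ nums := by
  rw [← PySem.List.index?_isSome_iff]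
  rcases ho : PySem.List.index? nums v with _ | k
  · have hn : (fstD nums).get? v = none := by rw [fstD_get, ho]; rfl
    have := (PySem.Dict.get?_eq_none_iff_contains _ v).1 hn
    simp [this]
  · have hs : (fstD nums).get? v = some (k : Int) := by rw [fstD_get, ho]; rfl
    constructor
    · intro _; rfl
    · intro _
      by_contra hc
      have hcf : (fstD nums).contains v = false := by simpa using hc
      have := (PySem.Dict.get?_eq_none_iff_contains (fstD nums) v).2 hcf
      rw [hs] at this
      simp at this

lemma fstD_getD (nums : List Int) (v : Int) (k : Nat)
    (h : PySem.List.index? nums v = some k) :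
    (fstD nums).getD v 0 = (k : Int) := by
  rw [PySem.Dict.getD_eq_get?_getD, fstD_get, h]
  rfl

lemma cntD_getD (nums : List Int) (v : Int) :
    (cntD nums).getD v 0 = (nums.count v : Int) := by
  unfold cntD
  rw [PySem.Dict.getD_foldl_insert_add_one]
  have h0 : (PySem.Dict.empty : PySem.Dict Int Int).getD v 0 = 0 := rfl
  rw [h0, zero_add]

lemma foldl_ite_add {α : Type} (l : List α) (f : Int → α → Int) (g : α → Int)
    (h : ∀ acc x, f acc x = acc + g x) (a : Int) :
    l.foldl f a = a + (l.map g).sum := by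
  have h1 : l.foldl f a = l.foldl (fun acc x => acc + g x) a :=
    PySem.List.foldl_congr_mem l f (fun acc x => acc + g x) a (fun acc x _ => h acc x)
  rw [h1, PySem.List.foldl_add]

lemma sum_swap {α β : Type} (l : List α) (r : List β) (f : α → β → Int) :
    (l.map (fun x => (r.map (f x)).sum)).sum
    = (r.map (fun y => (l.map (fun x => f x y)).sum)).sum := by
  induction l with
  | nil => simp
  | cons x xs ih =>
    simp only [List.map_cons, List.sum_cons, ih]
    rw [← PySem.List.sum_map_add_int]

lemma sum_ite_count (l : List Int) (c w : Int) :
    (l.map (fun s => if s = c then w else 0)).sum = (l.count c : Int) * w := by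
  induction l with
  | nil => simp
  | cons x xs ih =>
    simp only [List.map_cons, List.sum_cons, ih, List.count_cons]
    by_cases h : x = c
    · simp [h, add_mul]; ring
    · simp [h]

lemma A_eq_sum (nums : List Int) :
    opposite_count nums
    = (nums.map (fun s =>
        ((PySem.List.pyRange 1 ((nums.length : Int) - 1) 1).map (aBody nums s)).sum)).sum := by
  unfold opposite_count
  rw [foldl_ite_add nums _ (fun s =>
      ((PySem.List.pyRange 1 ((nums.length : Int) - 1) 1).map (aBody nums s)).sum)
      (fun acc s => by
        rw [foldl_ite_add _ _ (aBody nums s) (fun a i => by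
          unfold aBody
          rcases PySem.List.index? nums s with _ | k <;> split <;> simp <;> split <;> simp)]) 0]
  simp

lemma B_eq_sum (nums : List Int) :
    opposite_count_alt nums
    = ((PySem.List.pyRange 1 ((nums.length : Int) - 1) 1).map (bBody nums)).sum := by
  unfold opposite_count_alt
  rw [pairFold]
  rw [foldl_ite_add _ _ (bBody nums) (fun a i => by
    unfold bBody cntD fstD
    split <;> simp_all)]
  simp

lemma per_index (nums : List Int) (i : Int) :
    (nums.map (fun s => aBody nums s i)).sum = bBody nums i := by
  set t := -(PySem.List.pyGetD nums i 0) with ht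
  have hv0 : t + PySem.List.pyGetD nums i 0 = 0 := by rw [ht]; ring
  rcases ho : PySem.List.index? nums t with _ | k
  · -- t never occurs in nums
    have hm : t ∉ nums := (PySem.List.index?_eq_none_iff _ _).1 ho
    have hmap : ∀ s ∈ nums, aBody nums s i = if s = t then (0 : Int) else 0 := by
      intro s hs
      have hst : s ≠ t := fun h => hm (h ▸ hs)
      unfold aBody
      have : ¬ (s + PySem.List.pyGetD nums i 0 = 0) := by omega
      simp [this, hst]
    rw [List.map_congr_left hmap, sum_ite_count]
    have hc : ¬ ((fstD nums).contains t = true) := fun h => hm ((fstD_contains nums t).1 h)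
    unfold bBody
    rw [← ht]
    simp [hc]
  · have hmap : ∀ s ∈ nums, aBody nums s i
        = if s = t then (if (k : Int) < i then (1 : Int) else 0) else 0 := by
      intro s _
      by_cases hst : s = t
      · subst hst
        unfold aBody
        rw [ho]
        simp [hv0]
      · unfold aBody
        have : ¬ (s + PySem.List.pyGetD nums i 0 = 0) := by omega
        simp [this, hst]
    rw [List.map_congr_left hmap, sum_ite_count]
    have hm : t ∈ nums := (PySem.List.index?_isSome_iff _ _).1 (by rw [ho]; rfl)
    have hc := (fstD_contains nums t).2 hm
    unfold bBody
    rw [← ht, fstD_getD nums t k ho, cntD_getD]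
    simp only [hc, true_and]
    split <;> simp [mul_comm]

-- ===== VERDICT (by name: the statement is the Claim_ definition above) =====
theorem opposite_count_spec : Claim_equal_opposite_count := by
  intro nums _
  show opposite_count nums = opposite_count_alt nums
  rw [A_eq_sum, B_eq_sum, sum_swap]
  congr 1
  exact List.map_congr_left (fun i _ => per_index nums i)
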